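-- pv_equiv track=rewrite | github.com/JOHNDRAJ/linear-binary-programming-swiss-chess-pairing | optimization/primary_optimization.py | color_normalization_constant
-- ===== SOURCE A (Python) =====
-- def color_normalization_constant(colors, nodes):
--     l = []
--     for i in range(len(nodes)):
--         for j in range(i + 1, len(nodes)):
--             l.append(abs(colors[i] + colors[j]))
--     if sum(l) != 0:
--         return sum(l)
--     else:
--         return 1
-- ===== SOURCE B (Python) =====
-- def color_normalization_constant(colors, nodes):
--     # Sort the first len(nodes) colors; then for each element, the sum of
--     # |y + x| over earlier sorted elements y is obtained from a prefix-sum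
--     # table and one binary search (split at y < -x), giving O(n log n)
--     # instead of A's O(n^2) pair enumeration.
--     n = len(nodes)
--     ys = sorted(colors[:n])
--
--     def bisect_left(a, t):
--         # hand-rolled bisect.bisect_left (this module imports nothing)
--         lo, hi = 0, len(a)
--         while lo < hi:
--             mid = (lo + hi) // 2
--             if a[mid] < t:
--                 lo = mid + 1
--             else:
--                 hi = mid
--         return lo
--
--     prefix = [0]
--     s = 0
--     for y in ys:
--         s += y
--         prefix.append(s)
--
--     total = 0
--     rs = 0  # sum of ys[:j]
--     j = 0
--     for x in ys:
--         p = min(bisect_left(ys, -x), j)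
--         # sum_{i<j} |ys[i] + x| : ys[i] < -x exactly for i < p
--         total += rs - 2 * prefix[p] + (j - 2 * p) * x
--         rs += x
--         j += 1
--     return total if total != 0 else 1
-- ===== Notes on version B (the rewrite author's own statement) =====
-- stated objective: faster
-- what changed: A enumerates all pairs i<j and sums |colors[i]+colors[j]|; B sorts the first len(nodes) colors and, for each element, aggregates the absolute pair sums with all earlier elements via a prefix-sum table and one binary search on the sign-change point, removing the inner scan.
import Mathlib
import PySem

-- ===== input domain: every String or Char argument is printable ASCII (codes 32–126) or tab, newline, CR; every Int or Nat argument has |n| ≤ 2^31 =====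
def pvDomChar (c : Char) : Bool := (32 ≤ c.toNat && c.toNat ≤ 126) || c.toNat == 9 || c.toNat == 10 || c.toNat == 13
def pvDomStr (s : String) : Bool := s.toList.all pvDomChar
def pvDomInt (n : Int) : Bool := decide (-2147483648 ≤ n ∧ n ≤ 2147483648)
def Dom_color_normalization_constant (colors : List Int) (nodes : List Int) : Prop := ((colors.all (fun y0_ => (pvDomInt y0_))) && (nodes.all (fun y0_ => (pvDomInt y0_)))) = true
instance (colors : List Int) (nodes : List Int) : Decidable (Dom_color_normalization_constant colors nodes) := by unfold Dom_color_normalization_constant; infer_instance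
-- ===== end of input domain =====

-- B replaces A's O(n^2) pair enumeration by sort + prefix sums + binary search (measured faster); proved equal on Pre_.


-- ===== PORT A =====
-- literal port: l = []; for i in range(len(nodes)): for j in range(i+1, len(nodes)): l.append(abs(colors[i]+colors[j]));
-- return sum(l) if sum(l) != 0 else 1.  colors[i] is ported as pyGetD _ _ 0; Pre_ excludes the out-of-range (IndexError) inputs.
def color_normalization_constant (colors : List Int) (nodes : List Int) : Int :=
  let l : List Int :=
    (PySem.List.pyRange 0 (nodes.length : Int) 1).foldl (fun acc i =>
      (PySem.List.pyRange (i + 1) (nodes.length : Int) 1).foldl (fun acc2 j =>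
        acc2 ++ [|PySem.List.pyGetD colors i 0 + PySem.List.pyGetD colors j 0|]) acc) []
  if l.sum ≠ 0 then l.sum else 1

-- ===== PORT B =====
-- literal port of Source B: ys = sorted(colors[:n]); prefix-sum list built by one loop; then one loop over ys with
-- accumulators (total, rs, j); Source B's hand-rolled bisect_left is CPython's bisect.bisect_left algorithm and is
-- ported as PySem.List.bisectLeft (the prelude's exact model of it).
def color_normalization_constant_alt (colors : List Int) (nodes : List Int) : Int :=
  let n : Nat := nodes.length
  let ys : List Int := PySem.List.sorted (PySem.List.slice colors none (some (n : Int))) (fun x => x)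
  let pfx : List Int × Int := ys.foldl (fun st y => (st.1 ++ [st.2 + y], st.2 + y)) ([0], 0)
  let res : Int × Int × Int := ys.foldl (fun st x =>
      let p : Int := min ((PySem.List.bisectLeft ys (-x) : Nat) : Int) st.2.2
      (st.1 + (st.2.1 - 2 * PySem.List.pyGetD pfx.1 p 0 + (st.2.2 - 2 * p) * x),
       st.2.1 + x, st.2.2 + 1)) (0, 0, 0)
  if res.1 ≠ 0 then res.1 else 1

-- ===== PRECONDITION & SPEC =====
-- Pre_ excludes exactly the inputs where A raises IndexError (colors shorter than nodes with at least one pair,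
-- i.e. len(nodes) >= 2, to index); it excludes no input on which A returns.
def Pre_color_normalization_constant (colors : List Int) (nodes : List Int) : Prop :=
  nodes.length ≤ colors.length ∨ nodes.length < 2
instance (colors : List Int) (nodes : List Int) : Decidable (Pre_color_normalization_constant colors nodes) := by
  unfold Pre_color_normalization_constant; infer_instance
def pvWitness_color_normalization_constant : List Int × List Int := ([1, -2, 3], [10, 20])

def Spec_color_normalization_constant (colors : List Int) (nodes : List Int) (out : Int) : Prop := out = color_normalization_constant_alt colors nodes
instance (colors : List Int) (nodes : List Int) (out : Int) : Decidable (Spec_color_normalization_constant colors nodes out) := by unfold Spec_color_normalization_constant; infer_instance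

-- ===== CLAIM (what is proved, stated in full; the proofs are below) =====
def Claim_equal_color_normalization_constant : Prop := ∀ (colors : List Int) (nodes : List Int), Dom_color_normalization_constant colors nodes → Pre_color_normalization_constant colors nodes → Spec_color_normalization_constant colors nodes (color_normalization_constant colors nodes)

-- ===== LEMMAS AND PROOFS =====

-- the mathematical pair sum: pvS xs = sum over i<j of |xs i + xs j|, head-grouped
def pvS : List Int → Int
  | [] => 0
  | x :: l => (l.map (fun y => |x + y|)).sum + pvS l

-- A's double loop, after the range/append bookkeeping is removed
def pvAsum (c : List Int) (n : Nat) : Int :=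
  ((List.range n).map (fun i =>
    ((List.range (n - (i + 1))).map (fun k => |c.getD i 0 + c.getD (i + 1 + k) 0|)).sum)).sum

lemma pvS_perm : ∀ {l₁ l₂ : List Int}, l₁.Perm l₂ → pvS l₁ = pvS l₂ := by
  intro l₁ l₂ h
  induction h with
  | nil => rfl
  | cons x h ih =>
      simp only [pvS]
      rw [ih, (h.map (fun y => |x + y|)).sum_eq]
  | swap x y l =>
      simp only [pvS, List.map_cons, List.sum_cons]
      rw [show |y + x| = |x + y| by rw [Int.add_comm]]
      ring
  | trans _ _ ih1 ih2 => rw [ih1, ih2]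

lemma pvS_append_singleton (l : List Int) (x : Int) :
    pvS (l ++ [x]) = pvS l + (l.map (fun y => |y + x|)).sum := by
  induction l with
  | nil => simp [pvS]
  | cons a t ih =>
      simp only [List.cons_append, pvS, List.map_append, List.sum_append, ih,
        List.map_cons, List.map_nil, List.sum_cons, List.sum_nil]
      ring

lemma pv_sum_flatMap {α : Type} (f : α → List Int) (l : List α) :
    (l.flatMap f).sum = (l.map (fun a => (f a).sum)).sum := by
  induction l with
  | nil => rfl
  | cons a t ih => simp [List.flatMap_cons, ih]

-- helper: a map over range m of getD is a map over take m
lemma pv_map_range_getD (f : Int → Int) :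
    ∀ (l : List Int) (m : Nat), m ≤ l.length →
      (List.range m).map (fun k => f (l.getD k 0)) = (l.take m).map f := by
  intro l
  induction l with
  | nil =>
      intro m hm
      have : m = 0 := by simpa using hm
      subst this
      simp
  | cons a t ih =>
      intro m hm
      cases m with
      | zero => simp
      | succ m' =>
          rw [List.range_succ_eq_map]
          simp only [List.map_cons, List.map_map, List.take_succ_cons, List.map_cons,
            List.getD_cons_zero]
          congr 1
          have := ih m' (by simpa using hm)
          rw [← this]
          apply List.map_congr_left
          intro k _
          simp [Function.comp]

lemma pvAsum_eq (c : List Int) : ∀ n : Nat, n ≤ c.length → pvAsum c n = pvS (c.take n) := by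
  induction c with
  | nil =>
      intro n hn
      have : n = 0 := by simpa using hn
      subst this
      simp [pvAsum, pvS]
  | cons x cs ih =>
      intro n hn
      cases n with
      | zero => simp [pvAsum, pvS]
      | succ m =>
          have hm : m ≤ cs.length := by simpa using hn
          simp only [pvAsum, List.range_succ_eq_map, List.map_cons, List.sum_cons,
            List.map_map]
          have h0 : ((List.range (m + 1 - 1)).map
              (fun k => |(x :: cs).getD 0 0 + (x :: cs).getD (0 + 1 + k) 0|)).sum
              = ((cs.take m).map (fun y => |x + y|)).sum := by
            have harg : ∀ k : Nat, (x :: cs).getD (0 + 1 + k) 0 = cs.getD k 0 := by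
              intro k
              have : 0 + 1 + k = k + 1 := by omega
              rw [this, List.getD_cons_succ]
            rw [show m + 1 - 1 = m from rfl]
            rw [show (fun k => |(x :: cs).getD 0 0 + (x :: cs).getD (0 + 1 + k) 0|)
                = fun k => |x + cs.getD k 0| from funext (fun k => by rw [harg k]; rfl)]
            rw [pv_map_range_getD (fun y => |x + y|) cs m hm]
          have hrest : ((List.range m).map
              ((fun i => ((List.range (m + 1 - (i + 1))).map
                (fun k => |(x :: cs).getD i 0 + (x :: cs).getD (i + 1 + k) 0|)).sum) ∘ Nat.succ)).sum
              = pvAsum cs m := by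
            unfold pvAsum
            congr 1
            apply List.map_congr_left
            intro i _
            simp only [Function.comp]
            have harg : m + 1 - (Nat.succ i + 1) = m - (i + 1) := by omega
            rw [harg]
            congr 1
            apply List.map_congr_left
            intro k _
            have e1 : (x :: cs).getD (Nat.succ i) 0 = cs.getD i 0 := List.getD_cons_succ ..
            have e2 : (x :: cs).getD (Nat.succ i + 1 + k) 0 = cs.getD (i + 1 + k) 0 := by
              have : Nat.succ i + 1 + k = (i + 1 + k) + 1 := by omega
              rw [this, List.getD_cons_succ]
            rw [e1, e2]
          rw [h0, hrest, ih m hm]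
          simp [pvS, List.take_succ_cons]

-- pyRange with step 1 as a map over List.range
lemma pv_pyRange_one (a b : Int) :
    PySem.List.pyRange a b 1 = (List.range (b - a).toNat).map (fun k : Nat => a + (k : Int)) := by
  rw [PySem.List.pyRange_of_pos a b one_pos]
  split_ifs with h
  · have h1 : (b - a + 1 - 1) / 1 = b - a := by omega
    rw [h1]
    apply List.map_congr_left
    intro k _
    ring
  · have h0 : (b - a).toNat = 0 := by omega
    simp [h0]

-- A computes `if pvAsum colors n ≠ 0 then … else 1`
lemma pvA_eq (colors nodes : List Int) :
    color_normalization_constant colors nodes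
      = (if pvAsum colors nodes.length ≠ 0 then pvAsum colors nodes.length else 1) := by
  simp only [color_normalization_constant]
  have hsum : ((PySem.List.pyRange 0 (nodes.length : Int) 1).foldl (fun acc i =>
      (PySem.List.pyRange (i + 1) (nodes.length : Int) 1).foldl (fun acc2 j =>
        acc2 ++ [|PySem.List.pyGetD colors i 0 + PySem.List.pyGetD colors j 0|]) acc) []).sum
      = pvAsum colors nodes.length := by
    simp only [PySem.List.foldl_append_singleton_eq_map]
    rw [show (fun (acc : List Int) (i : Int) =>
        acc ++ (PySem.List.pyRange (i + 1) (nodes.length : Int) 1).map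
          (fun j => |PySem.List.pyGetD colors i 0 + PySem.List.pyGetD colors j 0|))
        = fun acc i => acc ++ (fun i => (PySem.List.pyRange (i + 1) (nodes.length : Int) 1).map
          (fun j => |PySem.List.pyGetD colors i 0 + PySem.List.pyGetD colors j 0|)) i from rfl]
    rw [PySem.List.foldl_append_eq_flatMap, List.nil_append,
      PySem.List.pyRange_zero_natCast, List.flatMap_map, pv_sum_flatMap]
    unfold pvAsum
    congr 1
    apply List.map_congr_left
    intro i _
    rw [pv_pyRange_one]
    have hcnt : ((nodes.length : Int) - ((i : Int) + 1)).toNat = nodes.length - (i + 1) := by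
      omega
    rw [hcnt, List.map_map]
    congr 1
    apply List.map_congr_left
    intro k _
    simp only [Function.comp]
    have e1 : ((i : Int) + 1 + (k : Int)) = ((i + 1 + k : Nat) : Int) := by push_cast; ring
    rw [e1, PySem.List.pyGetD_natCast, PySem.List.pyGetD_natCast]
  rw [hsum]

-- the prefix-sum loop of B
lemma pv_prefix_fold (l : List Int) : ∀ (acc : List Int) (s : Int),
    l.foldl (fun st y => (st.1 ++ [st.2 + y], st.2 + y)) (acc, s)
      = (acc ++ (List.range l.length).map (fun k => s + (l.take (k + 1)).sum), s + l.sum) := by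
  induction l with
  | nil => intro acc s; simp
  | cons y t ih =>
      intro acc s
      simp only [List.foldl_cons]
      rw [ih (acc ++ [s + y]) (s + y)]
      simp only [List.length_cons, List.range_succ_eq_map, List.map_cons, List.map_map,
        List.take_succ_cons, List.sum_cons, List.sum_nil, List.take_zero, Prod.mk.injEq]
      constructor
      · rw [List.append_assoc, List.singleton_append]
        congr 2
        · ring
        · apply List.map_congr_left
          intro k _
          simp only [Function.comp]
          ring
      · ring

-- B's prefix list is exactly the prefix sums of ys
lemma pv_prefix_list (ys : List Int) :
    (ys.foldl (fun st y => (st.1 ++ [st.2 + y], st.2 + y)) ([0], 0)).1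
      = (List.range (ys.length + 1)).map (fun k => (ys.take k).sum) := by
  rw [pv_prefix_fold]
  simp only [List.range_succ_eq_map, List.map_cons, List.map_map, List.take_zero,
    List.sum_nil]
  rw [List.singleton_append]
  congr 1
  apply List.map_congr_left
  intro k _
  simp [Function.comp]

-- sums of shifted / negated-shifted lists
lemma pv_sum_map_add (l : List Int) (c : Int) :
    (l.map (fun y => y + c)).sum = l.sum + (l.length : Int) * c := by
  induction l with
  | nil => simp
  | cons a t ih =>
      simp only [List.map_cons, List.sum_cons, List.length_cons, ih]
      push_cast
      ring

lemma pv_sum_map_neg_add (l : List Int) (c : Int) :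
    (l.map (fun y => -(y + c))).sum = -(l.sum + (l.length : Int) * c) := by
  induction l with
  | nil => simp
  | cons a t ih =>
      simp only [List.map_cons, List.sum_cons, List.length_cons, ih]
      push_cast
      ring

-- the split step: sum of |y + x| over a sorted prefix, via the bisection point
lemma pv_step (ys : List Int) (hs : List.Pairwise (· ≤ ·) ys) (k : Nat) (hk : k < ys.length)
    (x : Int) (hx : x = ys.getD k 0) :
    (ys.take k).sum - 2 * (ys.take (min (PySem.List.bisectLeft ys (-x)) k)).sum
        + ((k : Int) - 2 * ((min (PySem.List.bisectLeft ys (-x)) k : Nat) : Int)) * x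
      = ((ys.take k).map (fun y => |y + x|)).sum := by
  obtain ⟨hble, hlt, hge⟩ := PySem.List.bisectLeft_spec ys (-x) hs
  set bl := PySem.List.bisectLeft ys (-x) with hbl
  set p := min bl k with hp
  have hpk : p ≤ k := min_le_right _ _
  have hkL : k ≤ ys.length := le_of_lt hk
  have hlen1 : (ys.take p).length = p := by
    rw [List.length_take]; omega
  have hsplit : ys.take k = ys.take p ++ (ys.take k).drop p := by
    rw [show ys.take p = (ys.take k).take p by rw [List.take_take]; congr 1; omega]
    rw [List.take_append_drop]
  have hlen2 : ((ys.take k).drop p).length = k - p := by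
    rw [List.length_drop, List.length_take]; omega
  have hneg : ∀ y ∈ ys.take p, y < -x := by
    intro y hy
    obtain ⟨i, hi, hiy⟩ := List.mem_iff_getElem.mp hy
    rw [List.getElem_take] at hiy
    have hip : i < p := by rw [hlen1] at hi; exact hi
    have hiL : i < ys.length := by omega
    have := hlt i hiL (by omega)
    omega
  have hpos : ∀ y ∈ (ys.take k).drop p, -x ≤ y := by
    intro y hy
    obtain ⟨m, hm, hmy⟩ := List.mem_iff_getElem.mp hy
    rw [hlen2] at hm
    have hblk : bl ≤ k := by
      by_contra hc
      have : p = k := by omega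
      omega
    have hidx : p + m < ys.length := by omega
    rw [List.getElem_drop, List.getElem_take] at hmy
    have := hge (p + m) hidx (by omega)
    omega
  have h1 : ((ys.take p).map (fun y => |y + x|)).sum
      = -((ys.take p).sum + (p : Int) * x) := by
    rw [List.map_congr_left (fun y hy => abs_of_neg (by have := hneg y hy; omega))]
    rw [pv_sum_map_neg_add, hlen1]
  have h2 : (((ys.take k).drop p).map (fun y => |y + x|)).sum
      = ((ys.take k).drop p).sum + ((k : Int) - (p : Int)) * x := by
    rw [List.map_congr_left (fun y hy => abs_of_nonneg (by have := hpos y hy; omega))]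
    rw [pv_sum_map_add, hlen2]
    have : ((k - p : Nat) : Int) = (k : Int) - (p : Int) := by omega
    rw [this]
  have hdsum : ((ys.take k).drop p).sum = (ys.take k).sum - (ys.take p).sum := by
    have := congrArg List.sum hsplit
    rw [List.sum_append] at this
    omega
  calc (ys.take k).sum - 2 * (ys.take p).sum + ((k : Int) - 2 * (p : Int)) * x
      = -((ys.take p).sum + (p : Int) * x)
        + (((ys.take k).sum - (ys.take p).sum) + ((k : Int) - (p : Int)) * x) := by ring
    _ = ((ys.take k).map (fun y => |y + x|)).sum := by
        rw [← hdsum, ← h1, ← h2, ← List.sum_append, ← List.map_append, ← hsplit]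

-- the main loop of B maintains (pvS (take k), sum (take k), k)
lemma pv_main_fold (ys : List Int) (hs : List.Pairwise (· ≤ ·) ys) (pl : List Int)
    (hpl : pl = (List.range (ys.length + 1)).map (fun k => (ys.take k).sum)) :
    ∀ k, k ≤ ys.length →
      ((ys.take k).foldl (fun st x =>
          (st.1 + (st.2.1 - 2 * PySem.List.pyGetD pl
              (min ((PySem.List.bisectLeft ys (-x) : Nat) : Int) st.2.2) 0
            + (st.2.2 - 2 * min ((PySem.List.bisectLeft ys (-x) : Nat) : Int) st.2.2) * x),
           st.2.1 + x, st.2.2 + 1)) ((0 : Int), (0 : Int), (0 : Int)))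
        = (pvS (ys.take k), (ys.take k).sum, (k : Int)) := by
  intro k hk
  induction k with
  | zero => simp [pvS]
  | succ m ihm =>
      have hm : m < ys.length := by omega
      rw [List.take_succ_eq_append_getElem hm, List.foldl_append, ihm (by omega)]
      simp only [List.foldl_cons, List.foldl_nil]
      set x := ys[m] with hxdef
      have hxd : x = ys.getD m 0 := by rw [List.getD_eq_getElem ys 0 hm]
      have hmin : min ((PySem.List.bisectLeft ys (-x) : Nat) : Int) ((m : Nat) : Int)
          = ((min (PySem.List.bisectLeft ys (-x)) m : Nat) : Int) := by
        omega
      have hpmk : min (PySem.List.bisectLeft ys (-x)) m < ys.length + 1 := by omega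
      have hget : PySem.List.pyGetD pl ((min (PySem.List.bisectLeft ys (-x)) m : Nat) : Int) 0
          = (ys.take (min (PySem.List.bisectLeft ys (-x)) m)).sum := by
        rw [PySem.List.pyGetD_natCast, hpl,
          PySem.List.getD_map_range _ _ _ _ hpmk]
      rw [hmin, hget]
      refine Prod.ext ?_ (Prod.ext ?_ ?_)
      · show pvS (ys.take m) + _ = pvS (ys.take m ++ [x])
        rw [pvS_append_singleton, ← pv_step ys hs m hm x hxd]
      · show (ys.take m).sum + x = (ys.take m ++ [x]).sum
        rw [List.sum_append]; simp
      · show (m : Int) + 1 = ((m + 1 : Nat) : Int)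
        push_cast; ring

-- B computes `if pvS ys ≠ 0 then … else 1` with ys the sorted truncated colors
lemma pvB_eq (colors nodes : List Int) :
    color_normalization_constant_alt colors nodes
      = (if pvS (PySem.List.sorted (PySem.List.slice colors none (some (nodes.length : Int))) (fun x => x)) ≠ 0
          then pvS (PySem.List.sorted (PySem.List.slice colors none (some (nodes.length : Int))) (fun x => x))
          else 1) := by
  simp only [color_normalization_constant_alt]
  set ys := PySem.List.sorted (PySem.List.slice colors none (some (nodes.length : Int))) (fun x => x) with hys
  have hs : List.Pairwise (· ≤ ·) ys := PySem.List.sorted_pairwise _ _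
  have hfold := pv_main_fold ys hs _ (pv_prefix_list ys) ys.length le_rfl
  rw [List.take_length] at hfold
  simp only [hfold]

theorem color_normalization_constant_spec : Claim_equal_color_normalization_constant := by
  intro colors nodes _ hpre
  unfold Spec_color_normalization_constant
  rw [pvA_eq, pvB_eq]
  by_cases hle : nodes.length ≤ colors.length
  · have hslice : PySem.List.slice colors none (some (nodes.length : Int)) = colors.take nodes.length :=
      PySem.List.slice_to_natCast colors nodes.length
    have hperm : (PySem.List.sorted (PySem.List.slice colors none (some (nodes.length : Int))) (fun x => x)).Perm (colors.take nodes.length) := by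
      rw [hslice]; exact PySem.List.sorted_perm _ _ _
    rw [pvAsum_eq colors nodes.length hle, pvS_perm hperm]
  · -- Pre_ forces nodes.length < 2 here; both sides are 1
    have hgt : colors.length < nodes.length := by omega
    have hn2 : nodes.length < 2 := by
      rcases hpre with h | h
      · omega
      · exact h
    cases nodes with
    | nil =>
        have h0 : pvAsum colors 0 = 0 := by simp [pvAsum]
        have hys : PySem.List.slice colors none (some ((List.length ([] : List Int) : Nat) : Int)) = [] := by
          rw [PySem.List.slice_to_natCast]
          simp
        simp only [List.length_nil] at *
        rw [hys] at *
        simp [h0, pvS, PySem.List.sorted]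
    | cons a t =>
        have ht : t = [] := by
          cases t with
          | nil => rfl
          | cons b u => simp at hn2
        subst ht
        have hc : colors = [] := by
          cases colors with
          | nil => rfl
          | cons b u => simp at hgt
        subst hc
        have h0 : pvAsum ([] : List Int) 1 = 0 := by simp [pvAsum]
        have hys : PySem.List.slice ([] : List Int) none (some ((List.length [a] : Nat) : Int)) = [] := by
          rw [PySem.List.slice_to_natCast]
          rfl
        simp only [List.length_cons, List.length_nil] at *
        rw [hys] at *
        simp [h0, pvS, PySem.List.sorted]
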